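-- pv_equiv track=rewrite | github.com/martinezmarianotea-code/Agent_ZAI | Correct/zai/modes/organizer.py | _clave_orden
-- ===== SOURCE A (Python) =====
-- _DIGRAFO_MAP: dict[str, str] = {}
--
-- def _clave_orden(palabra: str) -> str:
--     """Genera clave de ordenamiento respetando el alfabeto zapoteco."""
--     p = palabra.lower().strip()
--     resultado = []
--     i = 0
--     while i < len(p):
--         # Intentar dígrafos de 3 letras primero
--         for tam in (3, 2, 1):
--             fragmento = p[i:i + tam]
--             if fragmento in _DIGRAFO_MAP:
--                 resultado.append(_DIGRAFO_MAP[fragmento])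
--                 i += tam
--                 break
--         else:
--             resultado.append(p[i])
--             i += 1
--     return "".join(resultado)
-- ===== SOURCE B (Python) =====
-- _DIGRAFO_MAP: dict[str, str] = {}
--
-- def _clave_orden(palabra: str) -> str:
--     """Genera clave de ordenamiento respetando el alfabeto zapoteco."""
--     # _DIGRAFO_MAP is empty in this module, so the digraph substitution is the
--     # identity on every character: the sort key is just the normalised string.
--     return palabra.lower().strip()
-- ===== Notes on version B (the rewrite author's own statement) =====
-- stated objective: simpler
-- what changed: The per-character while-loop probing (3,2,1)-length fragments against the module's digraph map is replaced by the closed form lower().strip(): the map is empty in this module, so the substitution loop is the identity and B returns the normalised string directly.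
import Mathlib
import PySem

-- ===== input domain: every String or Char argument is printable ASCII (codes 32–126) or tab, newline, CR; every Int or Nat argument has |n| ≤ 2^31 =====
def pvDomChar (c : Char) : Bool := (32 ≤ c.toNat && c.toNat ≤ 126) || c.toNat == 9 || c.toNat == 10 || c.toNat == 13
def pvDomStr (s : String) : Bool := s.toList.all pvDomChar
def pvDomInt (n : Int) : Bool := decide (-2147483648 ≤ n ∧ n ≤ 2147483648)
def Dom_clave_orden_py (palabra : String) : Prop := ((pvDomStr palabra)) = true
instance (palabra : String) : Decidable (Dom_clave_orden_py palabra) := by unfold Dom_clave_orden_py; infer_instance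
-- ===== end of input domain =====

-- B replaces A's fragment-probing while-loop by the closed form lower().strip():
-- the module's _DIGRAFO_MAP is empty, so the substitution loop is the identity (objective: simpler).

-- ===== PORT A =====
-- _DIGRAFO_MAP: dict[str, str] = {}
def digrafoMap : PySem.Dict String String := PySem.Dict.empty

-- the while-loop of A: i walks over p, probing fragments of length 3, 2, 1 against the map
-- (p[i:i+tam] with 0 ≤ i is exactly slice; p[i] with i < len p is exactly p[i])
def claveLoopA (p : List Char) (i : Nat) (resultado : List String) : List String :=
  if h : i < p.length then
    -- tam = 3
    match PySem.Dict.get? digrafoMap (String.ofList (PySem.List.slice p (some (i : Int)) (some ((i : Int) + 3)))) with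
    | some v => claveLoopA p (i + 3) (resultado ++ [v])
    | none =>
      -- tam = 2
      match PySem.Dict.get? digrafoMap (String.ofList (PySem.List.slice p (some (i : Int)) (some ((i : Int) + 2)))) with
      | some v => claveLoopA p (i + 2) (resultado ++ [v])
      | none =>
        -- tam = 1
        match PySem.Dict.get? digrafoMap (String.ofList (PySem.List.slice p (some (i : Int)) (some ((i : Int) + 1)))) with
        | some v => claveLoopA p (i + 1) (resultado ++ [v])
        | none => claveLoopA p (i + 1) (resultado ++ [String.ofList [p[i]]])  -- else: resultado.append(p[i])
  else resultado
termination_by p.length - i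

def clave_orden_py (palabra : String) : String :=
  let p := PySem.Str.strip (PySem.Str.lower palabra)
  PySem.Str.join "" (claveLoopA p.toList 0 [])

-- ===== PORT B =====
def clave_orden_py_alt (palabra : String) : String :=
  PySem.Str.strip (PySem.Str.lower palabra)

-- ===== PRECONDITION & SPEC =====
def Spec_clave_orden_py (palabra : String) (out : String) : Prop := out = clave_orden_py_alt palabra
instance (palabra : String) (out : String) : Decidable (Spec_clave_orden_py palabra out) := by unfold Spec_clave_orden_py; infer_instance

-- ===== CLAIM (what is proved, stated in full; the proofs are below) =====
def Claim_equal_clave_orden_py : Prop := ∀ (palabra : String), Dom_clave_orden_py palabra → Spec_clave_orden_py palabra (clave_orden_py palabra)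

-- ===== LEMMAS AND PROOFS =====

-- the map is empty, so every probe misses and the loop emits the characters of p from i on
theorem claveLoopA_empty (p : List Char) (i : Nat) (res : List String) :
    claveLoopA p i res = res ++ (p.drop i).map (fun c => String.ofList [c]) := by
  induction hn : p.length - i using Nat.strong_induction_on generalizing i res with
  | _ n ih =>
    subst hn
    by_cases h : i < p.length
    · have step : claveLoopA p i res = claveLoopA p (i + 1) (res ++ [String.ofList [p[i]]]) := by
        rw [claveLoopA]; exact dif_pos h
      rw [step, ih (p.length - (i + 1)) (by omega) (i + 1) _ rfl]
      have hdrop : p.drop i = p[i] :: p.drop (i + 1) := List.drop_eq_getElem_cons h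
      rw [hdrop, List.map_cons]
      simp only [List.append_assoc, List.singleton_append]
    · rw [claveLoopA, dif_neg h, List.drop_eq_nil_of_le (Nat.le_of_not_lt h),
        List.map_nil, List.append_nil]

theorem join_singletons (cs : List Char) :
    PySem.Str.join "" (cs.map (fun c => String.ofList [c])) = String.ofList cs := by
  apply String.ext
  rw [PySem.Str.toList_join]
  simp only [List.map_map]
  have hcomp : (String.toList ∘ fun c => String.ofList [c]) = fun c => [c] := by
    funext c; simp
  rw [hcomp]
  simp [PySem.Chars.join_nil_singletons cs]

-- ===== VERDICT (by name: the statement is the Claim_ definition above) =====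
theorem clave_orden_py_spec : Claim_equal_clave_orden_py := by
  intro palabra _
  show PySem.Str.join "" (claveLoopA (PySem.Str.strip (PySem.Str.lower palabra)).toList 0 []) =
    PySem.Str.strip (PySem.Str.lower palabra)
  rw [claveLoopA_empty]
  simp only [List.nil_append, List.drop_zero]
  rw [join_singletons, String.ofList_toList]
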